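-- pv_equiv track=rewrite | github.com/TheHeadlessSourceMan/javascriptTools | jsHelper.py | GetFunctionsFromCodeString
-- ===== SOURCE A (Python) =====
-- import typing
--
-- def GetFunctionsFromCodeString(code:str)->typing.Dict[str,str]:
--     """
--     Given a string representing javascript code, returns a functions dict
--     """
--     fns:typing.Dict[str,str]={}
--     for line in code.split('\n'):
--         line=line.strip()
--         if line[0:8]=='function':
--             fnName=line[8:].split('(',1)[0].strip()
--             fnCode=''
--             # TODO: start braket counting until end of function then set fnCode
--             #   after that do something like fns[fnName]=fnCode
--             fns[fnName]=fnCode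
--     return fns
-- ===== SOURCE B (Python) =====
-- def GetFunctionsFromCodeString(code):
--     """
--     Given a string representing javascript code, returns a functions dict.
--     Single forward pass over the characters with a small state machine
--     (no split/strip/slicing passes over lines).
--     """
--     fns = {}
--     mode, pending, buf = 'lead', 'function', []
--     for ch in code + '\n':
--         if ch == '\n':
--             if mode == 'name' or mode == 'done':
--                 fns[''.join(buf).strip()] = ''
--             mode, pending, buf = 'lead', 'function', []
--         elif mode == 'lead':
--             if ch == pending[0]:
--                 pending = pending[1:]
--                 if not pending:
--                     mode = 'name'
--             elif pending == 'function' and ch.isspace():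
--                 pass
--             else:
--                 mode = 'skip'
--         elif mode == 'name':
--             if ch == '(':
--                 mode = 'done'
--             else:
--                 buf.append(ch)
--     return fns
-- ===== Notes on version B (the rewrite author's own statement) =====
-- stated objective: alternative
-- what changed: Replaces A's staged line processing (split('\n'), per-line strip, fixed-width slice test, split('(')) by a single forward character pass: a four-state machine (leading-whitespace/keyword matching, name collection, after-'(', skip-line) that scans code+'\n' once and inserts a name into the dict at each newline.
import Mathlib
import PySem

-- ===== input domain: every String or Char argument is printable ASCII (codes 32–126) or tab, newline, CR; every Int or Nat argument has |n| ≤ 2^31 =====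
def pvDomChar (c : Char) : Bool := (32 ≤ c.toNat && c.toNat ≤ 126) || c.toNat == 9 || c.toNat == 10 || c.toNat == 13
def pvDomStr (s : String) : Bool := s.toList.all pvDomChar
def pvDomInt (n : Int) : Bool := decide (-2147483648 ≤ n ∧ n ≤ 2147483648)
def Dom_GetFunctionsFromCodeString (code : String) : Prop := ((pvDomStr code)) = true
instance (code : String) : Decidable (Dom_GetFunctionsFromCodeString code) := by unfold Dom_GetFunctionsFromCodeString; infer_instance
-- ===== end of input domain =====

-- B replaces A's staged line processing (split lines, strip, slice-compare, split on '(')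
-- by a single forward character pass with a four-state machine — objective: alternative.

-- ===== PORT A =====
-- code.split('\n'): the separator "\n" is non-empty, so split? is some; .getD [] is exact.
-- line[8:].split('(',1): split always returns a non-empty list, so [0] is its head; .headD "" is exact.
def GetFunctionsFromCodeString (code : String) : List (String × String) :=
  let fns : PySem.Dict String String := PySem.Dict.empty
  let fns := ((PySem.Str.split? code "\n").getD []).foldl (fun fns line =>
    let line := PySem.Str.strip line
    if PySem.Str.slice line (some 0) (some 8) == "function" then
      let fnName := PySem.Str.strip
        (((PySem.Str.splitMax? (PySem.Str.slice line (some 8) none) "(" 1).getD []).headD "")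
      let fnCode := ""
      fns.insert fnName fnCode
    else fns) fns
  fns.items

-- ===== PORT B =====
-- One step of Source B's state machine; the state is (mode, pending, buf, fns).
-- 'ch == pending[0]' is ported as 'some ch == pending[0]?' (pending is never empty in mode "lead",
-- so Python never raises there); ''.join(buf) of a list of characters is String.ofList buf.
def gfStep (st : String × String × List Char × PySem.Dict String String) (ch : Char) :
    String × String × List Char × PySem.Dict String String :=
  let (mode, pending, buf, fns) := st
  if ch == '\n' then
    if mode == "name" || mode == "done" then
      ("lead", "function", [], fns.insert (PySem.Str.strip (String.ofList buf)) "")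
    else
      ("lead", "function", [], fns)
  else if mode == "lead" then
    if some ch == PySem.Str.pyGet? pending 0 then
      let pending' := PySem.Str.slice pending (some 1) none
      if pending' == "" then ("name", pending', buf, fns) else ("lead", pending', buf, fns)
    else if pending == "function" && PySem.Chars.isspace ch then
      (mode, pending, buf, fns)
    else
      ("skip", pending, buf, fns)
  else if mode == "name" then
    if ch == '(' then ("done", pending, buf, fns)
    else (mode, pending, buf ++ [ch], fns)
  else (mode, pending, buf, fns)

-- for ch in code + '\n': a fold of gfStep over the characters of code plus the sentinel newline
def GetFunctionsFromCodeString_alt (code : String) : List (String × String) :=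
  ((code.toList ++ ['\n']).foldl gfStep
    ("lead", "function", [], PySem.Dict.empty)).2.2.2.items

-- ===== PRECONDITION & SPEC =====
def Spec_GetFunctionsFromCodeString (code : String) (out : List (String × String)) : Prop := out = GetFunctionsFromCodeString_alt code
instance (code : String) (out : List (String × String)) : Decidable (Spec_GetFunctionsFromCodeString code out) := by unfold Spec_GetFunctionsFromCodeString; infer_instance

-- ===== CLAIM (what is proved, stated in full; the proofs are below) =====
def Claim_equal_GetFunctionsFromCodeString : Prop := ∀ (code : String), Dom_GetFunctionsFromCodeString code → Spec_GetFunctionsFromCodeString code (GetFunctionsFromCodeString code)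

-- ===== LEMMAS AND PROOFS =====

-- A's per-line dict step, phrased over the line's characters
def stepA (d : PySem.Dict String String) (l : List Char) : PySem.Dict String String :=
  if ("function".toList : List Char) <+: PySem.Chars.lstrip l then
    d.insert (String.ofList (PySem.Chars.strip
      (((PySem.Chars.lstrip l).drop 8).takeWhile (fun c => !(c == '('))))) ""
  else d

-- structural version of splitting on '\n'
def linesAux : List Char → List Char → List (List Char)
  | pre, [] => [pre]
  | pre, c :: r => if c = '\n' then pre :: linesAux [] r else linesAux (pre ++ [c]) r

-- the initial / reset state of the machine
def gfInit (d : PySem.Dict String String) : String × String × List Char × PySem.Dict String String :=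
  ("lead", "function", [], d)

-- single-step reductions of gfStep
theorem gfStep_other (mode p : String) (b : List Char) (d : PySem.Dict String String) (c : Char)
    (hc : (c == '\n') = false) (h1 : mode ≠ "lead") (h2 : mode ≠ "name") :
    gfStep (mode, p, b, d) c = (mode, p, b, d) := by
  simp [gfStep, hc, h1, h2]

theorem gfStep_name_par (p : String) (b : List Char) (d : PySem.Dict String String) :
    gfStep ("name", p, b, d) '(' = ("done", p, b, d) := by
  simp [gfStep]

theorem gfStep_name_other (p : String) (b : List Char) (d : PySem.Dict String String) (c : Char)
    (hc : (c == '\n') = false) (hp : (c == '(') = false) :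
    gfStep ("name", p, b, d) c = ("name", p, b ++ [c], d) := by
  simp [gfStep, hc, hp]

theorem gfStep_nl_record (mode p : String) (b : List Char) (d : PySem.Dict String String)
    (h : mode = "name" ∨ mode = "done") :
    gfStep (mode, p, b, d) '\n'
      = ("lead", "function", [], d.insert (PySem.Str.strip (String.ofList b)) "") := by
  rcases h with h | h <;> subst h <;> simp [gfStep]

theorem gfStep_nl_plain (mode p : String) (b : List Char) (d : PySem.Dict String String)
    (h1 : mode ≠ "name") (h2 : mode ≠ "done") :
    gfStep (mode, p, b, d) '\n' = ("lead", "function", [], d) := by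
  simp [gfStep, h1, h2]

theorem splitOn_go_eq : ∀ (cs : List Char) (fuel : Nat) (cur : List Char) (acc : List (List Char)),
    cs.length ≤ fuel →
    PySem.Chars.splitOn.go ['\n'] fuel cs cur acc = acc.reverse ++ linesAux cur.reverse cs := by
  intro cs
  induction cs with
  | nil =>
    intro fuel cur acc _
    cases fuel with
    | zero => show ((cur.reverse ++ []) :: acc).reverse = _; simp [linesAux]
    | succ f => show (cur.reverse :: acc).reverse = _; simp [linesAux]
  | cons c r ih =>
    intro fuel cur acc h
    cases fuel with
    | zero => simp at h
    | succ f =>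
      have hr : r.length ≤ f := by simpa using h
      rw [show PySem.Chars.splitOn.go ['\n'] (f+1) (c :: r) cur acc
          = (if (['\n'] : List Char).isPrefixOf (c :: r)
              then PySem.Chars.splitOn.go ['\n'] f (List.drop 1 (c :: r)) [] (cur.reverse :: acc)
              else PySem.Chars.splitOn.go ['\n'] f r (c :: cur) acc) from rfl]
      by_cases hc : c = '\n'
      · subst hc
        rw [if_pos (by simp [List.isPrefixOf])]
        simp only [List.drop_succ_cons, List.drop_zero]
        rw [ih f [] (cur.reverse :: acc) hr]
        simp [linesAux]
      · rw [if_neg (by simp [List.isPrefixOf, Ne.symm hc])]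
        rw [ih f (c :: cur) acc hr]
        simp [linesAux, hc]

theorem splitOn_eq_linesAux (cs : List Char) :
    PySem.Chars.splitOn cs ['\n'] = linesAux [] cs := by
  have := splitOn_go_eq cs (cs.length + 1) [] [] (by omega)
  simpa [PySem.Chars.splitOn] using this


theorem linesAux_no_nl : ∀ (m pre : List Char), '\n' ∉ m → linesAux pre m = [pre ++ m] := by
  intro m
  induction m with
  | nil => intro pre _; simp [linesAux]
  | cons c r ih =>
    intro pre h
    have hc : c ≠ '\n' := fun hc => h (hc ▸ List.mem_cons_self)
    have hr : '\n' ∉ r := fun hr => h (List.mem_cons_of_mem _ hr)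
    simp [linesAux, hc, ih (pre ++ [c]) hr]


theorem linesAux_append_nl : ∀ (l pre r : List Char), '\n' ∉ l →
    linesAux pre (l ++ '\n' :: r) = (pre ++ l) :: linesAux [] r := by
  intro l
  induction l with
  | nil => intro pre r _; simp [linesAux]
  | cons c t ih =>
    intro pre r h
    have hc : c ≠ '\n' := fun hc => h (hc ▸ List.mem_cons_self)
    have ht : '\n' ∉ t := fun hr => h (List.mem_cons_of_mem _ hr)
    simp [linesAux, hc, ih (pre ++ [c]) r ht]


theorem run_skip : ∀ (l : List Char) (p : String) (b : List Char) (d : PySem.Dict String String),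
    '\n' ∉ l → l.foldl gfStep ("skip", p, b, d) = ("skip", p, b, d) := by
  intro l
  induction l with
  | nil => intro p b d _; rfl
  | cons c r ih =>
    intro p b d h
    have hc : (c == '\n') = false := by
      simp only [beq_eq_false_iff_ne, ne_eq]
      exact fun hc => h (hc ▸ List.mem_cons_self)
    have hr : '\n' ∉ r := fun hr => h (List.mem_cons_of_mem _ hr)
    rw [List.foldl_cons, gfStep_other _ _ _ _ _ hc (by decide) (by decide)]
    exact ih p b d hr

theorem run_done : ∀ (l : List Char) (p : String) (b : List Char) (d : PySem.Dict String String),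
    '\n' ∉ l → l.foldl gfStep ("done", p, b, d) = ("done", p, b, d) := by
  intro l
  induction l with
  | nil => intro p b d _; rfl
  | cons c r ih =>
    intro p b d h
    have hc : (c == '\n') = false := by
      simp only [beq_eq_false_iff_ne, ne_eq]
      exact fun hc => h (hc ▸ List.mem_cons_self)
    have hr : '\n' ∉ r := fun hr => h (List.mem_cons_of_mem _ hr)
    rw [List.foldl_cons, gfStep_other _ _ _ _ _ hc (by decide) (by decide)]
    exact ih p b d hr

theorem run_name : ∀ (l : List Char) (p : String) (b : List Char) (d : PySem.Dict String String),
    '\n' ∉ l →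
    l.foldl gfStep ("name", p, b, d) =
      if '(' ∈ l then ("done", p, b ++ l.takeWhile (fun c => !(c == '(')), d)
      else ("name", p, b ++ l, d) := by
  intro l
  induction l with
  | nil => intro p b d _; simp
  | cons c r ih =>
    intro p b d h
    have hc : (c == '\n') = false := by
      simp only [beq_eq_false_iff_ne, ne_eq]
      exact fun hc => h (hc ▸ List.mem_cons_self)
    have hr : '\n' ∉ r := fun hr => h (List.mem_cons_of_mem _ hr)
    by_cases hpar : c = '('
    · subst hpar
      rw [List.foldl_cons, gfStep_name_par, run_done r p b d hr]
      simp [List.takeWhile]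
    · have hp : (c == '(') = false := by simp [hpar]
      rw [List.foldl_cons, gfStep_name_other _ _ _ _ hc hp, ih p (b ++ [c]) d hr]
      simp only [List.mem_cons, List.takeWhile_cons, hp, Bool.not_false, if_true]
      by_cases hm : '(' ∈ r <;> simp [hm, hpar, eq_comm, List.append_assoc]

-- String.ofList bookkeeping
theorem ofList_cons_ne_empty (a : Char) (t : List Char) : (String.ofList (a :: t) == "") = false := by
  have h2 : String.ofList (a :: t) ≠ "" := fun h => by
    simpa using String.ofList_inj.mp (h.trans rfl)
  simp [h2]

theorem ofList_short_ne_function (p : List Char) (h : p.length ≤ 7) :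
    (String.ofList p == "function") = false := by
  apply beq_eq_false_iff_ne.mpr
  intro he
  have := String.ofList_inj.mp (he.trans (rfl : ("function":String) = String.ofList "function".toList))
  subst this
  simp at h

theorem slice1_ofList (x : Char) (p' : List Char) :
    PySem.Str.slice (String.ofList (x :: p')) (some 1) none = String.ofList p' := by
  simp [PySem.Str.slice, PySem.List.slice_from (x :: p') (a := 1) (by norm_num)]

theorem strip_ofList (b : List Char) :
    PySem.Str.strip (String.ofList b) = String.ofList (PySem.Chars.strip b) := by
  rw [← String.toList_inj]
  simp [PySem.Str.toList_strip]

-- gfStep in mode "lead"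
theorem gfStep_lead_match (x : Char) (p' : List Char) (b : List Char) (d : PySem.Dict String String)
    (hc : (x == '\n') = false) :
    gfStep ("lead", String.ofList (x :: p'), b, d) x
      = if p' = [] then ("name", String.ofList p', b, d) else ("lead", String.ofList p', b, d) := by
  cases p' with
  | nil => simp [gfStep, hc, slice1_ofList]
  | cons y t =>
    simp [gfStep, hc, slice1_ofList, ofList_cons_ne_empty]

theorem gfStep_lead_mismatch (x : Char) (p' : List Char) (b : List Char) (d : PySem.Dict String String)
    (c : Char) (hc : (c == '\n') = false) (hx : (c == x) = false) (hlen : p'.length ≤ 6) :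
    gfStep ("lead", String.ofList (x :: p'), b, d) c = ("skip", String.ofList (x :: p'), b, d) := by
  have h8 : String.ofList (x :: p') ≠ "function" :=
    beq_eq_false_iff_ne.mp (ofList_short_ne_function (x :: p') (by simp; omega))
  simp [gfStep, hc, hx, h8]

theorem gfStep_init_ws (c : Char) (d : PySem.Dict String String)
    (hc : (c == '\n') = false) (hs : PySem.Chars.isspace c = true) :
    gfStep (gfInit d) c = gfInit d := by
  have hcf : (c == 'f') = false := by
    apply beq_eq_false_iff_ne.mpr
    intro h
    subst h
    exact absurd hs (by decide)
  simp [gfStep, gfInit, hc, hcf, hs]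

theorem gfStep_init_other (c : Char) (d : PySem.Dict String String)
    (hc : (c == '\n') = false) (hcf : (c == 'f') = false) (hs : PySem.Chars.isspace c = false) :
    gfStep (gfInit d) c = ("skip", "function", [], d) := by
  simp [gfStep, gfInit, hc, hcf, hs]

theorem run_lead : ∀ (p l : List Char) (d : PySem.Dict String String),
    p ≠ [] → p.length ≤ 7 → '\n' ∉ l →
    (p <+: l → l.foldl gfStep ("lead", String.ofList p, [], d)
        = (l.drop p.length).foldl gfStep ("name", "", [], d))
    ∧ (¬ p <+: l → ∃ mode pend, l.foldl gfStep ("lead", String.ofList p, [], d) = (mode, pend, [], d)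
        ∧ (mode = "lead" ∨ mode = "skip")) := by
  intro p
  induction p with
  | nil => intro l d h; exact absurd rfl h
  | cons x p' ih =>
    intro l d _ hlen hnl
    have hlen' : p'.length ≤ 6 := by
      have := hlen
      simp at this
      omega
    constructor
    · intro hpre
      cases l with
      | nil => simp at hpre
      | cons a r =>
        obtain ⟨hax, hpre'⟩ := List.cons_prefix_cons.mp hpre
        subst hax
        have hcn : (x == '\n') = false := by
          simp only [beq_eq_false_iff_ne, ne_eq]
          exact fun hc => hnl (hc ▸ List.mem_cons_self)
        have hr : '\n' ∉ r := fun hr => hnl (List.mem_cons_of_mem _ hr)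
        rw [List.foldl_cons, gfStep_lead_match x p' [] d hcn]
        cases p' with
        | nil =>
          rw [if_pos rfl]
          rfl
        | cons y t =>
          rw [if_neg (by simp)]
          have := (ih r d (by simp) (by omega) hr).1 hpre'
          rw [this]
          simp
    · intro hnpre
      cases l with
      | nil => exact ⟨"lead", String.ofList (x :: p'), rfl, Or.inl rfl⟩
      | cons a r =>
        have hcn : (a == '\n') = false := by
          simp only [beq_eq_false_iff_ne, ne_eq]
          exact fun hc => hnl (hc ▸ List.mem_cons_self)
        have hr : '\n' ∉ r := fun hr => hnl (List.mem_cons_of_mem _ hr)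
        by_cases hax : a = x
        · subst hax
          rw [List.foldl_cons, gfStep_lead_match a p' [] d hcn]
          cases p' with
          | nil => exact absurd (List.cons_prefix_cons.mpr ⟨rfl, List.nil_prefix⟩) hnpre
          | cons y t =>
            rw [if_neg (by simp)]
            have hnp' : ¬ (y :: t) <+: r := fun hp => hnpre (List.cons_prefix_cons.mpr ⟨rfl, hp⟩)
            exact (ih r d (by simp) (by omega) hr).2 hnp'
        · rw [List.foldl_cons,
            gfStep_lead_mismatch x p' [] d a hcn (by simpa using hax) hlen',
            run_skip r _ _ _ hr]
          exact ⟨"skip", String.ofList (x :: p'), rfl, Or.inr rfl⟩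

theorem run_init_ws : ∀ (l : List Char) (d : PySem.Dict String String), '\n' ∉ l →
    l.foldl gfStep (gfInit d) = (l.dropWhile PySem.Chars.isspace).foldl gfStep (gfInit d) := by
  intro l
  induction l with
  | nil => intro d _; rfl
  | cons c r ih =>
    intro d h
    have hc : (c == '\n') = false := by
      simp only [beq_eq_false_iff_ne, ne_eq]
      exact fun hc => h (hc ▸ List.mem_cons_self)
    have hr : '\n' ∉ r := fun hr => h (List.mem_cons_of_mem _ hr)
    by_cases hs : PySem.Chars.isspace c = true
    · rw [List.foldl_cons, gfStep_init_ws c d hc hs, List.dropWhile_cons_of_pos hs]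
      exact ih d hr
    · rw [List.dropWhile_cons_of_neg hs]

theorem run_line : ∀ (l : List Char) (d : PySem.Dict String String), '\n' ∉ l →
    (l ++ ['\n']).foldl gfStep (gfInit d) = gfInit (stepA d l) := by
  intro l d hnl
  rw [List.foldl_append, run_init_ws l d hnl]
  have hnl' : '\n' ∉ l.dropWhile PySem.Chars.isspace :=
    fun h => hnl ((List.dropWhile_sublist _).subset h)
  unfold stepA
  rw [show PySem.Chars.lstrip l = l.dropWhile PySem.Chars.isspace from rfl]
  cases hs : l.dropWhile PySem.Chars.isspace with
  | nil =>
    simp only [List.foldl_nil, List.foldl_cons, gfInit]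
    rw [gfStep_nl_plain _ _ _ _ (by decide) (by decide)]
    rw [if_neg (by simp)]
  | cons c t =>
    rw [hs] at hnl'
    have hcsp : PySem.Chars.isspace c = false := by
      have := List.head_dropWhile_not (PySem.Chars.isspace) (l := l) (by rw [hs]; simp)
      simpa [hs] using this
    have hcn : (c == '\n') = false := by
      simp only [beq_eq_false_iff_ne, ne_eq]
      exact fun hc => hnl' (hc ▸ List.mem_cons_self)
    have hnt : '\n' ∉ t := fun h => hnl' (List.mem_cons_of_mem _ h)
    by_cases hcf : c = 'f'
    · subst hcf
      rw [show List.foldl gfStep (gfInit d) ('f' :: t)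
          = List.foldl gfStep ("lead", String.ofList ['u','n','c','t','i','o','n'], [], d) t from rfl]
      by_cases hpre : (['u','n','c','t','i','o','n'] : List Char) <+: t
      · rw [(run_lead ['u','n','c','t','i','o','n'] t d (by simp) (by simp) hnt).1 hpre,
          show (['u','n','c','t','i','o','n'] : List Char).length = 7 from rfl]
        have hnty : '\n' ∉ t.drop 7 := fun h => hnt (List.mem_of_mem_drop h)
        rw [run_name (t.drop 7) "" [] d hnty]
        have hkw : (("function".toList : List Char) <+: 'f' :: t) := by
          rw [show ("function".toList : List Char) = 'f' :: ['u','n','c','t','i','o','n'] from rfl]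
          exact List.cons_prefix_cons.mpr ⟨rfl, hpre⟩
        rw [if_pos hkw]
        have hdrop : (('f' :: t).drop 8) = t.drop 7 := by
          simp [List.drop_succ_cons]
        rw [hdrop]
        by_cases hpar : '(' ∈ t.drop 7
        · rw [if_pos hpar]
          simp only [List.foldl_cons, List.foldl_nil, List.nil_append]
          rw [gfStep_nl_record _ _ _ _ (Or.inr rfl), strip_ofList]
          rfl
        · rw [if_neg hpar]
          simp only [List.foldl_cons, List.foldl_nil, List.nil_append]
          rw [gfStep_nl_record _ _ _ _ (Or.inl rfl), strip_ofList]
          have : (t.drop 7).takeWhile (fun c => !(c == '(')) = t.drop 7 :=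
            List.takeWhile_eq_self_iff.mpr (fun x hx => by
              simp only [Bool.not_eq_eq_eq_not, Bool.not_true, beq_eq_false_iff_ne, ne_eq]
              exact fun hxe => hpar (hxe ▸ hx))
          rw [this]
          rfl
      · obtain ⟨mode, pend, heq, hmode⟩ :=
          (run_lead ['u','n','c','t','i','o','n'] t d (by simp) (by simp) hnt).2 hpre
        rw [heq]
        simp only [List.foldl_cons, List.foldl_nil]
        rw [gfStep_nl_plain mode pend [] d
          (by rcases hmode with h | h <;> subst h <;> decide)
          (by rcases hmode with h | h <;> subst h <;> decide)]
        rw [if_neg (fun hkw => by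
          rw [show ("function".toList : List Char) = 'f' :: ['u','n','c','t','i','o','n'] from rfl] at hkw
          exact hpre (List.cons_prefix_cons.mp hkw).2)]
        rfl
    · have hcf' : (c == 'f') = false := by simpa using hcf
      rw [show List.foldl gfStep (gfInit d) (c :: t)
          = List.foldl gfStep (gfStep (gfInit d) c) t from rfl]
      rw [gfStep_init_other c d hcn hcf' hcsp, run_skip t _ _ _ hnt]
      simp only [List.foldl_cons, List.foldl_nil]
      rw [gfStep_nl_plain _ _ _ _ (by decide) (by decide)]
      rw [if_neg (fun hkw => by
        rw [show ("function".toList : List Char) = 'f' :: ['u','n','c','t','i','o','n'] from rfl] at hkw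
        exact hcf (List.cons_prefix_cons.mp hkw).1.symm)]
      rfl

theorem run_main : ∀ (n : Nat) (cs : List Char) (d : PySem.Dict String String), cs.length ≤ n →
    (cs ++ ['\n']).foldl gfStep (gfInit d) = gfInit ((linesAux [] cs).foldl stepA d) := by
  intro n
  induction n with
  | zero =>
    intro cs d h
    have : cs = [] := List.length_eq_zero_iff.mp (Nat.le_zero.mp h)
    subst this
    rw [run_line [] d (by simp)]
    rfl
  | succ n ih =>
    intro cs d h
    by_cases hmem : '\n' ∈ cs
    · have hne : cs.dropWhile (fun c => !(c == '\n')) ≠ [] := by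
        intro hnil
        rw [List.dropWhile_eq_nil_iff] at hnil
        have := hnil '\n' hmem
        simp at this
      obtain ⟨c, t, hct⟩ := List.exists_cons_of_ne_nil hne
      have hcnl : c = '\n' := by
        have := List.head_dropWhile_not (fun c : Char => !(c == '\n')) (l := cs) (by rw [hct]; simp)
        simp only [hct, List.head_cons, Bool.not_eq_eq_eq_not, Bool.not_false, beq_iff_eq] at this
        exact this
      subst hcnl
      set l := cs.takeWhile (fun c => !(c == '\n')) with hl
      have hdecomp : cs = l ++ '\n' :: t := by
        rw [hl, ← hct, List.takeWhile_append_dropWhile]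
      have hnll : '\n' ∉ l := fun hm => by
        have := List.mem_takeWhile_imp hm
        simp at this
      have hlen : t.length ≤ n := by
        have := congrArg List.length hdecomp
        simp at this
        omega
      rw [hdecomp, linesAux_append_nl l [] t hnll, List.nil_append]
      rw [show (l ++ '\n' :: t) ++ ['\n'] = (l ++ ['\n']) ++ (t ++ ['\n']) by simp]
      rw [List.foldl_append, run_line l d hnll, ih t _ hlen, List.foldl_cons]
    · rw [linesAux_no_nl cs [] hmem, List.nil_append, run_line cs d hmem]
      rfl

-- ===== A-side per-line characterisation =====

-- once a first piece has been banked in the accumulator, it is the head of splitOnMax.go's result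
theorem go_acc (sep : List Char) : ∀ (fuel m : Nat) (l cur acc : List Char) (accs : List (List Char)),
    ∃ t, PySem.Chars.splitOnMax.go sep fuel m l cur (accs ++ [acc]) = acc :: t := by
  intro fuel
  induction fuel with
  | zero =>
    intro m l cur acc accs
    exact ⟨accs.reverse ++ [cur.reverse ++ l], by simp [PySem.Chars.splitOnMax.go]⟩
  | succ f ih =>
    intro m l cur acc accs
    cases l with
    | nil => exact ⟨accs.reverse ++ [cur.reverse], by simp [PySem.Chars.splitOnMax.go]⟩
    | cons c rest =>
      by_cases hm : m = 0
      · subst hm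
        exact ⟨accs.reverse ++ [cur.reverse ++ (c :: rest)], by simp [PySem.Chars.splitOnMax.go]⟩
      · by_cases hp : sep.isPrefixOf (c :: rest) = true
        · have := ih (m - 1) (List.drop sep.length (c :: rest)) [] acc (cur.reverse :: accs)
          simpa [PySem.Chars.splitOnMax.go, hm, hp] using this
        · have := ih m rest (c :: cur) acc accs
          simpa [PySem.Chars.splitOnMax.go, hm, hp] using this

-- head of a '('-split with enough fuel: the characters up to the first '('
theorem go_head : ∀ (l : List Char) (fuel : Nat) (cur : List Char), l.length ≤ fuel →
    ∃ t, PySem.Chars.splitOnMax.go ['('] fuel 1 l cur []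
      = (cur.reverse ++ l.takeWhile (fun c => !(c == '('))) :: t := by
  intro l
  induction l with
  | nil =>
    intro fuel cur _
    cases fuel with
    | zero => exact ⟨[], by simp [PySem.Chars.splitOnMax.go]⟩
    | succ f => exact ⟨[], by simp [PySem.Chars.splitOnMax.go]⟩
  | cons c rest ih =>
    intro fuel cur hlen
    cases fuel with
    | zero => simp at hlen
    | succ f =>
      by_cases hc : c = '('
      · subst hc
        obtain ⟨t, ht⟩ := go_acc ['('] f 0 (List.drop 1 ('(' :: rest)) [] cur.reverse []
        refine ⟨t, ?_⟩
        simp only [List.drop_succ_cons, List.drop_zero, List.nil_append] at ht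
        simp only [PySem.Chars.splitOnMax.go, List.isPrefixOf, List.takeWhile]
        simpa using ht
      · obtain ⟨t, ht⟩ := ih f (c :: cur)
          (by simpa using Nat.lt_succ_iff.mp (Nat.lt_of_lt_of_le (Nat.lt_succ_self _) (by simpa using hlen)))
        refine ⟨t, ?_⟩
        have hp : (['('] : List Char).isPrefixOf (c :: rest) = false := by
          simp [List.isPrefixOf, Ne.symm hc]
        simp only [PySem.Chars.splitOnMax.go, hp]
        rw [ht]
        simp [hc]

-- A's name extraction (split('(',1)[0]) = the characters before the first '('
theorem name_eq (s : String) :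
    ((PySem.Str.splitMax? s "(" 1).getD []).headD ""
      = String.ofList (s.toList.takeWhile (fun c => !(c == '('))) := by
  obtain ⟨t, ht⟩ := go_head s.toList (s.length + 1) [] (by simp)
  simp only [PySem.Str.splitMax?, PySem.Chars.splitMax?, PySem.Chars.splitOnMax]
  norm_num
  rw [if_neg (by decide), show ("(" : String).toList = ['('] from by decide, ht]
  simp

-- A's fixed-width slice test (line[0:8] == 'function') = prefix test
theorem cond_eq (l : String) :
    (PySem.Str.slice l (some 0) (some 8) == "function") = PySem.Str.startswith l "function" := by
  have h0 : (PySem.Str.slice l (some 0) (some 8)).toList = l.toList.take 8 := by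
    rw [PySem.Str.toList_slice]
    simpa using PySem.List.slice_natCast l.toList 0 8
  rw [PySem.Str.startswith_eq]
  apply Bool.eq_iff_iff.mpr
  simp only [beq_iff_eq, PySem.Chars.startswith, List.isPrefixOf_iff_prefix,
    List.prefix_iff_eq_take, show (("function":String).toList).length = 8 from by decide]
  rw [← String.toList_inj, h0]
  exact eq_comm

-- ===== strip/rstrip bookkeeping =====

theorem rstrip_decomp (s : List Char) :
    ∃ w, s = PySem.Chars.rstrip s ++ w ∧ ∀ c ∈ w, PySem.Chars.isspace c = true := by
  refine ⟨(s.reverse.takeWhile PySem.Chars.isspace).reverse, ?_, ?_⟩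
  · have h : PySem.Chars.rstrip s ++ (s.reverse.takeWhile PySem.Chars.isspace).reverse = s := by
      unfold PySem.Chars.rstrip
      rw [← List.reverse_append, List.takeWhile_append_dropWhile, List.reverse_reverse]
    exact h.symm
  · intro c hc
    exact List.mem_takeWhile_imp (by simpa using hc)


theorem rstrip_append_ws (x w : List Char) (hw : ∀ c ∈ w, PySem.Chars.isspace c = true) :
    PySem.Chars.rstrip (x ++ w) = PySem.Chars.rstrip x := by
  unfold PySem.Chars.rstrip
  rw [List.reverse_append, List.dropWhile_append,
    if_pos (by
      simp only [List.isEmpty_iff, List.dropWhile_eq_nil_iff]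
      intro c hc
      exact hw c (by simpa using hc))]

theorem strip_append_ws (x w : List Char) (hw : ∀ c ∈ w, PySem.Chars.isspace c = true) :
    PySem.Chars.strip (x ++ w) = PySem.Chars.strip x := by
  unfold PySem.Chars.strip PySem.Chars.lstrip
  rw [List.dropWhile_append]
  by_cases hx : (x.dropWhile PySem.Chars.isspace).isEmpty = true
  · rw [if_pos hx]
    rw [List.dropWhile_eq_nil_iff.mpr hw]
    rw [List.isEmpty_iff.mp hx]
  · rw [if_neg hx]
    exact rstrip_append_ws _ _ hw

set_option maxRecDepth 4096 in
theorem kw_prefix_rstrip_iff (s : List Char) :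
    ("function".toList : List Char) <+: PySem.Chars.rstrip s ↔ ("function".toList : List Char) <+: s := by
  obtain ⟨w, hdecomp, hw⟩ := rstrip_decomp s
  have hpre : PySem.Chars.rstrip s <+: s := ⟨w, hdecomp.symm⟩
  rw [show ("function".toList : List Char) = ['f','u','n','c','t','i','o','n'] from rfl]
  constructor
  · intro h
    exact h.trans hpre
  · intro h
    by_cases hlen : 8 ≤ (PySem.Chars.rstrip s).length
    · exact List.prefix_of_prefix_length_le h hpre (by simpa using hlen)
    · exfalso
      set i := (PySem.Chars.rstrip s).length with hi
      have hi8 : i < 8 := by omega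
      have hslen : 8 ≤ s.length := by
        have := h.length_le
        simpa using this
      have his : i < s.length := lt_of_lt_of_le hi8 hslen
      have h1 : s[i] = (['f','u','n','c','t','i','o','n'] : List Char)[i]'(by simpa using hi8) :=
        (h.getElem (by simpa using hi8)).symm
      have h2 : s[i] ∈ w := by
        have hgw : s[i]'his = (PySem.Chars.rstrip s ++ w)[i]'(hdecomp ▸ his) := by
          congr 1
        rw [hgw, List.getElem_append_right (le_refl i)]
        exact List.getElem_mem _
      have h3 : PySem.Chars.isspace s[i] = true := hw _ h2
      have h4 : ∀ c ∈ (['f','u','n','c','t','i','o','n'] : List Char), PySem.Chars.isspace c = false := by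
        intro c hc
        simp only [List.mem_cons, List.not_mem_nil, or_false] at hc
        rcases hc with rfl|rfl|rfl|rfl|rfl|rfl|rfl|rfl <;> decide
      rw [h1] at h3
      rw [h4 _ (List.getElem_mem _)] at h3
      exact Bool.false_ne_true h3


theorem strip_takeWhile_append_ws (x w : List Char)
    (hw : ∀ c ∈ w, PySem.Chars.isspace c = true) :
    PySem.Chars.strip ((x ++ w).takeWhile (fun c => !(c == '(')))
      = PySem.Chars.strip (x.takeWhile (fun c => !(c == '('))) := by
  rw [List.takeWhile_append]
  by_cases hall : (List.takeWhile (fun c => !(c == '(')) x).length = x.length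
  · rw [if_pos hall]
    have hx : List.takeWhile (fun c => !(c == '(')) x = x :=
      (List.takeWhile_prefix _).eq_of_length hall
    rw [hx]
    exact strip_append_ws _ _ (fun c hc => hw c ((List.takeWhile_prefix _).subset hc))
  · rw [if_neg hall]


-- A's per-line computation on the string of a raw line = stepA
theorem stepA_eq (d : PySem.Dict String String) (l : List Char) :
    (if PySem.Str.slice (PySem.Str.strip (String.ofList l)) (some 0) (some 8) == "function" then
      d.insert (PySem.Str.strip
        (((PySem.Str.splitMax? (PySem.Str.slice (PySem.Str.strip (String.ofList l)) (some 8) none) "(" 1).getD []).headD "")) ""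
    else d) = stepA d l := by
  by_cases hc : ("function".toList : List Char) <+: PySem.Chars.lstrip l
  · have hbt : (PySem.Str.slice (PySem.Str.strip (String.ofList l)) (some 0) (some 8) == "function") = true := by
      rw [cond_eq, strip_ofList, PySem.Str.startswith_eq, String.toList_ofList,
        PySem.Chars.startswith_iff]
      exact (kw_prefix_rstrip_iff (PySem.Chars.lstrip l)).mpr hc
    have hsl : PySem.Str.slice (PySem.Str.strip (String.ofList l)) (some 8) none
        = String.ofList ((PySem.Chars.strip l).drop 8) := by
      rw [strip_ofList]
      simp [PySem.Str.slice, PySem.List.slice_from (PySem.Chars.strip l) (a := 8) (by norm_num)]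
    have hname : PySem.Str.strip
        (((PySem.Str.splitMax? (PySem.Str.slice (PySem.Str.strip (String.ofList l)) (some 8) none) "(" 1).getD []).headD "")
        = String.ofList (PySem.Chars.strip
            (((PySem.Chars.lstrip l).drop 8).takeWhile (fun c => !(c == '(')))) := by
      rw [hsl, name_eq, String.toList_ofList, strip_ofList]
      refine congrArg String.ofList ?_
      have hkw' : ("function".toList : List Char) <+: PySem.Chars.rstrip (PySem.Chars.lstrip l) :=
        (kw_prefix_rstrip_iff _).mpr hc
      have h8 : 8 ≤ (PySem.Chars.rstrip (PySem.Chars.lstrip l)).length := by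
        simpa using hkw'.length_le
      obtain ⟨w, hdec, hw⟩ := rstrip_decomp (PySem.Chars.lstrip l)
      have hdrop : (PySem.Chars.lstrip l).drop 8
          = (PySem.Chars.rstrip (PySem.Chars.lstrip l)).drop 8 ++ w := by
        conv_lhs => rw [hdec]
        rw [List.drop_append_of_le_length h8]
      rw [show PySem.Chars.strip l = PySem.Chars.rstrip (PySem.Chars.lstrip l) from rfl, hdrop]
      exact (strip_takeWhile_append_ws _ _ hw).symm
    rw [if_pos hbt]
    unfold stepA
    rw [if_pos hc, hname]

  · have hbf : (PySem.Str.slice (PySem.Str.strip (String.ofList l)) (some 0) (some 8) == "function") = false := by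
      rw [cond_eq, strip_ofList]
      apply Bool.eq_false_iff.mpr
      intro h
      rw [PySem.Str.startswith_eq, String.toList_ofList, PySem.Chars.startswith_iff] at h
      exact hc ((kw_prefix_rstrip_iff (PySem.Chars.lstrip l)).mp h)
    rw [if_neg (ne_true_of_eq_false hbf)]
    unfold stepA
    rw [if_neg hc]

-- ===== VERDICT (by name: the statement is the Claim_ definition above) =====
theorem GetFunctionsFromCodeString_spec : Claim_equal_GetFunctionsFromCodeString := by
  intro code _
  unfold Spec_GetFunctionsFromCodeString GetFunctionsFromCodeString GetFunctionsFromCodeString_alt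
  simp only [show PySem.Str.split? code "\n"
      = some ((PySem.Chars.splitOn code.toList ['\n']).map String.ofList) from rfl,
    Option.getD_some, splitOn_eq_linesAux, List.foldl_map]
  simp only [stepA_eq]
  have hB := run_main code.toList.length code.toList PySem.Dict.empty le_rfl
  rw [show (("lead", "function", [], PySem.Dict.empty) :
      String × String × List Char × PySem.Dict String String)
      = gfInit PySem.Dict.empty from rfl, hB]
  rfl
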